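-- pv_equiv track=rewrite | github.com/openscanhub/openscanhub | osh/hub/scan/compare.py | compare_nevr_parts
-- ===== SOURCE A (Python) =====
-- import itertools
--
-- CSS_CLASS_OTHER = "light_green_font"
--
-- CSS_CLASS_BASE = "red_font"
--
-- def mark(content, css_class):
--     """
--     Surround *content* with ``<span>`` using *css_class*.
--
--     :param content: The content
--     :type content: str
--     :param css_class: The CSS class used in ``<span>``
--     :type css_class: str
--
--     :return: *content* surrounded with ``<span>`` styled with *css_class*
--     :rtype: str
--     """
--     return f'<span class="{css_class}">{content}</span>'
--
-- def mark_other(content):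
--     """
--     Render *content* in light green color using ``<span>``.
--
--     :param content: The content
--     :type content: str
--
--     :return: *content* in light green color as a HTML string
--     :rtype: str
--     """
--     return mark(content, CSS_CLASS_OTHER)
--
-- def mark_base(content):
--     """
--     Render *content* in red color using ``<span>``.
--
--     :param content: The content
--     :type content: str
--
--     :return: *content* in red color as a HTML string
--     :rtype: str
--     """
--     return mark(content, CSS_CLASS_BASE)
--
-- def compare_nevr_parts(other, base, prev_differ=False):
--     """
--     Compare two names, epochs, versions, or releases.
--
--     :param other: Name, epoch, version, or release as a list of its parts to be
--         compared against *base*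
--     :type other: list
--     :param base: Name, epoch, version, or release as a list of its parts
--     :type base: list
--     :param prev_differ: `True` if the previous comparison of name, epoch,
--         version, or release yielded a difference
--     :type prev_differ: bool
--
--     :return: the `tuple` containing a `bool` flag signaling whether *other* and
--       *base* are different, a string with marked different parts of *other*,
--       and a string with marked different parts of *base*
--     :rtype: tuple
--
--     If *prev_differ* is `True`, *base* and *other* are considered different and
--     their parts are marked accordingly. Otherwise, *base* and *other* are
--     considered different if and only if they are different in some *n*th part.
--     In this case, all parts starting from *n*th part to the last part are
--     marked different. Empty parts are not marked.
--
--     Examples: Suppose that ``mark_other(x)`` yields ``f"({x})"`` and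
--     ``mark_base(x)`` yields ``f"[{x}]"``. Then
--     * ``compare_nvr_parts(["1", "2", "3"], ["1", "2", "3"], True)`` yields
--       ``(True, "(1).(2).(3)", "[1].[2].[3]")``;
--     * ``compare_nvr_parts(["1", "2", "3"], ["1", "1", "3"], False)`` yields
--       ``(True, "1.(2).(3)", "1.[1].[3]")``;
--     * ``compare_nvr_parts(["1", "2"], ["1", "2", "3"], False)`` yields
--       ``(True, "1.2", "1.2.[3]")``.
--     """
--     differ = prev_differ
--     diff_other = []
--     diff_base = []
--     for elm1, elm2 in itertools.zip_longest(other, base, fillvalue=""):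
--         differ = differ or elm1 != elm2
--         if elm1:
--             diff_other.append(mark_other(elm1) if differ else elm1)
--         if elm2:
--             diff_base.append(mark_base(elm2) if differ else elm2)
--     return differ, ".".join(diff_other), ".".join(diff_base)
-- ===== SOURCE B (Python) =====
-- import itertools
--
-- CSS_CLASS_OTHER = "light_green_font"
--
-- CSS_CLASS_BASE = "red_font"
--
-- def mark(content, css_class):
--     return f'<span class="{css_class}">{content}</span>'
--
-- def mark_other(content):
--     return mark(content, CSS_CLASS_OTHER)
--
-- def mark_base(content):
--     return mark(content, CSS_CLASS_BASE)
--
-- def compare_nevr_parts(other, base, prev_differ=False):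
--     pairs = list(itertools.zip_longest(other, base, fillvalue=""))
--     if prev_differ:
--         n = 0
--     else:
--         n = next((i for i, (e1, e2) in enumerate(pairs) if e1 != e2), len(pairs))
--     differ = prev_differ or n < len(pairs)
--     diff_other = ".".join(mark_other(e1) if i >= n else e1
--                           for i, (e1, _) in enumerate(pairs) if e1)
--     diff_base = ".".join(mark_base(e2) if i >= n else e2
--                          for i, (_, e2) in enumerate(pairs) if e2)
--     return differ, diff_other, diff_base
-- ===== Notes on version B (the rewrite author's own statement) =====
-- stated objective: alternative
-- what changed: A threads a mutable differ flag through one stateful loop; B first computes the divergence index n with a search over the zipped pairs, derives the flag from n < len, and then builds both marked strings with index-threshold comprehensions.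
import Mathlib
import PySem

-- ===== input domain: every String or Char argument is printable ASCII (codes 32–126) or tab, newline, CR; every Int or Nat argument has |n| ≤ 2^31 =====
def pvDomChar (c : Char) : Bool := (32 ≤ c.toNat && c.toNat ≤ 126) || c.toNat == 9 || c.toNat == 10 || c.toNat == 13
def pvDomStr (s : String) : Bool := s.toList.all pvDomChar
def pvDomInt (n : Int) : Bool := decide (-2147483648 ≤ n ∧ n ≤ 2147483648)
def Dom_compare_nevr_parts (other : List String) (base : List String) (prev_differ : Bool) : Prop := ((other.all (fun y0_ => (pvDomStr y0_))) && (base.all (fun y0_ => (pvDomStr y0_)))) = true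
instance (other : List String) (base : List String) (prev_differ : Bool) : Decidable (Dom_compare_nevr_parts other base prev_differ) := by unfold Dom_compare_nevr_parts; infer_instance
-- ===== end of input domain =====

-- B replaces A's single stateful loop by a different decomposition: first find the divergence
-- index n, then mark parts by index with comprehensions (objective: alternative, same cost).

-- ===== PORT A =====
-- itertools.zip_longest(other, base, fillvalue="")
def pvZipLongest : List String → List String → List (String × String)
  | [], [] => []
  | [], y :: ys => ("", y) :: pvZipLongest [] ys
  | x :: xs, [] => (x, "") :: pvZipLongest xs []
  | x :: xs, y :: ys => (x, y) :: pvZipLongest xs ys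

def pvMark (content css_class : String) : String :=
  "<span class=\"" ++ css_class ++ "\">" ++ content ++ "</span>"

def pvMarkOther (content : String) : String := pvMark content "light_green_font"

def pvMarkBase (content : String) : String := pvMark content "red_font"

def compare_nevr_parts (other : List String) (base : List String) (prev_differ : Bool) : Bool × String × String :=
  let r := (pvZipLongest other base).foldl
    (fun st p =>
      let differ := st.1 || (p.1 != p.2)
      ( differ,
        (if p.1 ≠ "" then st.2.1 ++ [if differ then pvMarkOther p.1 else p.1] else st.2.1),
        (if p.2 ≠ "" then st.2.2 ++ [if differ then pvMarkBase p.2 else p.2] else st.2.2) ))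
    (prev_differ, ([] : List String), ([] : List String))
  (r.1, PySem.Str.join "." r.2.1, PySem.Str.join "." r.2.2)

-- ===== PORT B =====
def compare_nevr_parts_alt (other : List String) (base : List String) (prev_differ : Bool) : Bool × String × String :=
  let pairs := pvZipLongest other base
  let n : Int :=
    if prev_differ then 0
    else (((PySem.List.enumerate pairs).find? (fun ip => ip.2.1 != ip.2.2)).elim
           ((pairs.length : Int)) (fun ip => ip.1))
  let differ := prev_differ || decide (n < (pairs.length : Int))
  let diff_other := (PySem.List.enumerate pairs).filterMap
    (fun ip => if ip.2.1 ≠ "" then some (if n ≤ ip.1 then pvMarkOther ip.2.1 else ip.2.1) else none)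
  let diff_base := (PySem.List.enumerate pairs).filterMap
    (fun ip => if ip.2.2 ≠ "" then some (if n ≤ ip.1 then pvMarkBase ip.2.2 else ip.2.2) else none)
  (differ, PySem.Str.join "." diff_other, PySem.Str.join "." diff_base)

-- ===== PRECONDITION & SPEC =====
def Spec_compare_nevr_parts (other : List String) (base : List String) (prev_differ : Bool) (out : Bool × String × String) : Prop := out = compare_nevr_parts_alt other base prev_differ
instance (other : List String) (base : List String) (prev_differ : Bool) (out : Bool × String × String) : Decidable (Spec_compare_nevr_parts other base prev_differ out) := by unfold Spec_compare_nevr_parts; infer_instance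

-- ===== CLAIM (what is proved, stated in full; the proofs are below) =====
def Claim_equal_compare_nevr_parts : Prop := ∀ (other : List String) (base : List String) (prev_differ : Bool), Dom_compare_nevr_parts other base prev_differ → Spec_compare_nevr_parts other base prev_differ (compare_nevr_parts other base prev_differ)

-- ===== LEMMAS AND PROOFS =====

-- Proof-side recursive description of A's loop (accumulators factored out).
def pvLoop : List (String × String) → Bool → Bool × List String × List String
  | [], d => (d, [], [])
  | p :: t, d =>
    let d' := d || (p.1 != p.2)
    let r := pvLoop t d'
    (r.1,
     (if p.1 ≠ "" then [if d' then pvMarkOther p.1 else p.1] else []) ++ r.2.1,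
     (if p.2 ≠ "" then [if d' then pvMarkBase p.2 else p.2] else []) ++ r.2.2)

-- B's two comprehensions, as functions of the threshold.
def pvFO (n : Int) (l : List (Int × (String × String))) : List String :=
  l.filterMap (fun ip => if ip.2.1 ≠ "" then some (if n ≤ ip.1 then pvMarkOther ip.2.1 else ip.2.1) else none)

def pvFB (n : Int) (l : List (Int × (String × String))) : List String :=
  l.filterMap (fun ip => if ip.2.2 ≠ "" then some (if n ≤ ip.1 then pvMarkBase ip.2.2 else ip.2.2) else none)

theorem pvFO_cons (n s : Int) (p : String × String) (t : List (String × String)) :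
    pvFO n (PySem.List.enumerate (p :: t) s)
      = (if p.1 ≠ "" then [if n ≤ s then pvMarkOther p.1 else p.1] else [])
        ++ pvFO n (PySem.List.enumerate t (s + 1)) := by
  simp only [PySem.List.enumerate_cons, pvFO, List.filterMap_cons]
  split_ifs <;> simp

theorem pvFB_cons (n s : Int) (p : String × String) (t : List (String × String)) :
    pvFB n (PySem.List.enumerate (p :: t) s)
      = (if p.2 ≠ "" then [if n ≤ s then pvMarkBase p.2 else p.2] else [])
        ++ pvFB n (PySem.List.enumerate t (s + 1)) := by
  simp only [PySem.List.enumerate_cons, pvFB, List.filterMap_cons]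
  split_ifs <;> simp

theorem pvFoldl_char (t : List (String × String)) (d : Bool) (ao ab : List String) :
    t.foldl
      (fun st p =>
        let differ := st.1 || (p.1 != p.2)
        ( differ,
          (if p.1 ≠ "" then st.2.1 ++ [if differ then pvMarkOther p.1 else p.1] else st.2.1),
          (if p.2 ≠ "" then st.2.2 ++ [if differ then pvMarkBase p.2 else p.2] else st.2.2) ))
      (d, ao, ab)
    = ((pvLoop t d).1, ao ++ (pvLoop t d).2.1, ab ++ (pvLoop t d).2.2) := by
  induction t generalizing d ao ab with
  | nil => simp [pvLoop]
  | cons p t ih =>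
    simp only [List.foldl_cons, pvLoop, ih]
    split_ifs <;> simp [List.append_assoc]

theorem pvFO_all (t : List (String × String)) (s n : Int) (h : n ≤ s) :
    pvFO n (PySem.List.enumerate t s)
      = t.filterMap (fun p => if p.1 ≠ "" then some (pvMarkOther p.1) else none) := by
  induction t generalizing s with
  | nil => simp [pvFO, PySem.List.enumerate_nil]
  | cons p t ih =>
    rw [pvFO_cons, if_pos h, ih (s + 1) (by omega), List.filterMap_cons]
    split_ifs <;> simp

theorem pvFB_all (t : List (String × String)) (s n : Int) (h : n ≤ s) :
    pvFB n (PySem.List.enumerate t s)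
      = t.filterMap (fun p => if p.2 ≠ "" then some (pvMarkBase p.2) else none) := by
  induction t generalizing s with
  | nil => simp [pvFB, PySem.List.enumerate_nil]
  | cons p t ih =>
    rw [pvFB_cons, if_pos h, ih (s + 1) (by omega), List.filterMap_cons]
    split_ifs <;> simp

theorem pvLoop_true (t : List (String × String)) :
    pvLoop t true
      = (true,
         t.filterMap (fun p => if p.1 ≠ "" then some (pvMarkOther p.1) else none),
         t.filterMap (fun p => if p.2 ≠ "" then some (pvMarkBase p.2) else none)) := by
  induction t with
  | nil => simp [pvLoop]
  | cons p t ih =>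
    simp only [pvLoop, ih, Bool.true_or, List.filterMap_cons]
    split_ifs <;> simp

theorem pvLoop_false (t : List (String × String)) (s : Int) :
    pvLoop t false
      = (decide ((t.findIdx (fun p => p.1 != p.2) : Int) < (t.length : Int)),
         pvFO ((t.findIdx (fun p => p.1 != p.2) : Int) + s) (PySem.List.enumerate t s),
         pvFB ((t.findIdx (fun p => p.1 != p.2) : Int) + s) (PySem.List.enumerate t s)) := by
  induction t generalizing s with
  | nil => simp [pvLoop, pvFO, pvFB, PySem.List.enumerate_nil]
  | cons p t ih =>
    rw [pvFO_cons, pvFB_cons]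
    cases hp : (p.1 != p.2) with
    | true =>
      simp only [pvLoop, hp, Bool.false_or, pvLoop_true, List.findIdx_cons, cond_true,
        List.length_cons]
      rw [pvFO_all t (s + 1) _ (by push_cast; omega), pvFB_all t (s + 1) _ (by push_cast; omega)]
      simp
    | false =>
      have hpe : p.1 = p.2 := by simpa using hp
      simp only [pvLoop, hp, Bool.false_or, List.findIdx_cons, cond_false, List.length_cons,
        ih (s + 1)]
      have hn : ¬ (((t.findIdx (fun p => p.1 != p.2) + 1 : Nat) : Int) + s ≤ s) := by
        push_cast; omega
      rw [if_neg hn, if_neg hn]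
      rw [show ((t.findIdx (fun p => p.1 != p.2) : Int)) + (s + 1)
            = (((t.findIdx (fun p => p.1 != p.2) + 1 : Nat) : Int)) + s by push_cast; ring]
      rw [show (decide ((t.findIdx (fun p => p.1 != p.2) : Int) < (t.length : Int)))
            = (decide ((((t.findIdx (fun p => p.1 != p.2) + 1 : Nat)) : Int) < (((t.length + 1 : Nat)) : Int))) by
        push_cast; rw [decide_eq_decide]; omega]
      simp

theorem pvFind_char (t : List (String × String)) (s d : Int) :
    (((PySem.List.enumerate t s).find? (fun ip => ip.2.1 != ip.2.2)).elim d (fun ip => ip.1))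
      = if (t.findIdx (fun p => p.1 != p.2)) < t.length then s + (t.findIdx (fun p => p.1 != p.2) : Int) else d := by
  induction t generalizing s with
  | nil => simp [PySem.List.enumerate_nil]
  | cons p t ih =>
    cases hp : (p.1 != p.2) with
    | true =>
      simp [PySem.List.enumerate_cons, hp, List.findIdx_cons]
    | false =>
      simp only [PySem.List.enumerate_cons, List.find?_cons, hp, List.findIdx_cons, cond_false,
        ih (s + 1), List.length_cons]
      by_cases h : List.findIdx (fun p => p.1 != p.2) t < t.length
      · rw [if_pos h, if_pos (by omega)]
        push_cast; ring
      · rw [if_neg h, if_neg (by omega)]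

-- n in B (prev_differ = false) is exactly findIdx (the default equals findIdx when nothing differs).
theorem pvN_eq (t : List (String × String)) :
    (((PySem.List.enumerate t 0).find? (fun ip => ip.2.1 != ip.2.2)).elim ((t.length : Int)) (fun ip => ip.1))
      = (t.findIdx (fun p => p.1 != p.2) : Int) := by
  rw [pvFind_char]
  have hle := List.findIdx_le_length (p := fun p : String × String => p.1 != p.2) (xs := t)
  split_ifs with h
  · omega
  · have : t.findIdx (fun p => p.1 != p.2) = t.length := by omega
    rw [this]

-- ===== VERDICT (by name: the statement is the Claim_ definition above) =====
theorem compare_nevr_parts_spec : Claim_equal_compare_nevr_parts := by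
  intro other base prev_differ _
  unfold Spec_compare_nevr_parts compare_nevr_parts compare_nevr_parts_alt
  simp only [pvFoldl_char, List.nil_append]
  cases prev_differ with
  | true =>
    simp only [pvLoop_true, if_true, Bool.true_or]
    rw [show (PySem.List.enumerate (pvZipLongest other base))
          = PySem.List.enumerate (pvZipLongest other base) 0 from rfl]
    rw [← pvFO, ← pvFB, pvFO_all _ 0 0 le_rfl, pvFB_all _ 0 0 le_rfl]
  | false =>
    simp only [Bool.false_or, Bool.false_eq_true, if_false]
    rw [show (PySem.List.enumerate (pvZipLongest other base))
          = PySem.List.enumerate (pvZipLongest other base) 0 from rfl]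
    rw [← pvFO, ← pvFB, pvN_eq, pvLoop_false (pvZipLongest other base) 0]
    simp
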